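-- pv_equiv track=rewrite | github.com/tommoseley/TheCombine | app/domain/services/render_model_builder.py | derive_risk_level
-- ===== SOURCE A (Python) =====
-- from typing import List, Dict, Optional, Any
--
-- def derive_risk_level(risks: List[Dict[str, Any]]) -> str:
--     """
--     Derive aggregate risk level from a list of risks.
--
--     FROZEN RULE (2026-01-08):
--     - If any risk has likelihood="high" ? "high"
--     - Else if any risk has likelihood="medium" ? "medium"
--     - Else ? "low"
--
--     Args:
--         risks: List of RiskV1-shaped dicts with optional 'likelihood' field
--
--     Returns:
--         One of: "high", "medium", "low"
--     """
--     if not risks: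
--         return "low"
--
--     likelihoods = [r.get("likelihood", "low") for r in risks if isinstance(r, dict)]
--
--     if "high" in likelihoods:
--         return "high"
--     elif "medium" in likelihoods:
--         return "medium"
--     else:
--         return "low"
-- ===== SOURCE B (Python) =====
-- def derive_risk_level(risks):
--     best = 1
--     for r in risks:
--         if isinstance(r, dict):
--             like = r.get("likelihood", "low")
--             best = max(best, 3 if like == "high" else 2 if like == "medium" else 1)
--     return "high" if best == 3 else "medium" if best == 2 else "low"
-- ===== Notes on version B (the rewrite author's own statement) =====
-- stated objective: idiomatic
-- what changed: Replaces the build-a-likelihood-list-then-ordered-membership-tests with a single max-reduction over an ordinal priority (high=3, medium=2, else 1) seeded at 1, mapped back to a label at the end.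
import Mathlib
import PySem

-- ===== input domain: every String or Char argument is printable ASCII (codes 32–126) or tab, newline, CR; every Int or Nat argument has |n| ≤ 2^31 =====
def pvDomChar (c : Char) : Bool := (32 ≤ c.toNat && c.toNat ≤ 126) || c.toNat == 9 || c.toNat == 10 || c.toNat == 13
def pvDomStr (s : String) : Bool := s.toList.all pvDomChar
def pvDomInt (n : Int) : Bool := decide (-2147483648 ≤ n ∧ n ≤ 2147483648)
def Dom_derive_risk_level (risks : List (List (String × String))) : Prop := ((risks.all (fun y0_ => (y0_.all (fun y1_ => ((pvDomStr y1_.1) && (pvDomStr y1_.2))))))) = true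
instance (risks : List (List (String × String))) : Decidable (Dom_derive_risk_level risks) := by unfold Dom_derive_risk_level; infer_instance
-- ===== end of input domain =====

-- B replaces A's likelihood-list plus ordered membership tests by a single max-reduction
-- over an ordinal priority, mapped back to a label (idiomatic; same cost).

-- ===== PORT A =====
def derive_risk_level (risks : List (List (String × String))) : String :=
  if risks = [] then "low"
  else
    let likelihoods := risks.map (fun r => (PySem.Dict.mk r).getD "likelihood" "low")
    if likelihoods.contains "high" then "high"
    else if likelihoods.contains "medium" then "medium"
    else "low"

-- ===== PORT B =====
def pvPrio (s : String) : Int :=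
  if s = "high" then 3 else if s = "medium" then 2 else 1

def derive_risk_level_alt (risks : List (List (String × String))) : String :=
  let best := risks.foldl (fun acc r => max acc (pvPrio ((PySem.Dict.mk r).getD "likelihood" "low"))) 1
  if best = 3 then "high" else if best = 2 then "medium" else "low"

-- ===== PRECONDITION & SPEC =====
def Spec_derive_risk_level (risks : List (List (String × String))) (out : String) : Prop := out = derive_risk_level_alt risks
instance (risks : List (List (String × String))) (out : String) : Decidable (Spec_derive_risk_level risks out) := by unfold Spec_derive_risk_level; infer_instance

-- ===== CLAIM (what is proved, stated in full; the proofs are below) =====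
def Claim_equal_derive_risk_level : Prop := ∀ (risks : List (List (String × String))), Dom_derive_risk_level risks → Spec_derive_risk_level risks (derive_risk_level risks)

-- ===== LEMMAS AND PROOFS =====

def pvLike (r : List (String × String)) : String := (PySem.Dict.mk r).getD "likelihood" "low"

-- the fold's result, characterised by the two membership tests A performs
theorem pv_fold_char (risks : List (List (String × String))) (acc : Int)
    (h1 : 1 ≤ acc) (h3 : acc ≤ 3) :
    risks.foldl (fun acc r => max acc (pvPrio (pvLike r))) acc =
      if (risks.map pvLike).contains "high" then 3
      else if (risks.map pvLike).contains "medium" then max acc 2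
      else acc := by
  induction risks generalizing acc with
  | nil => simp
  | cons r rs ih =>
    simp only [List.foldl_cons, List.map_cons, List.contains_cons]
    by_cases hh : pvLike r = "high"
    · have : pvPrio (pvLike r) = 3 := by simp [pvPrio, hh]
      rw [this, ih (max acc 3) (by omega) (by omega)]
      have hmax : max acc 3 = 3 := by omega
      simp [hh, hmax]
    · by_cases hm : pvLike r = "medium"
      · have : pvPrio (pvLike r) = 2 := by simp [pvPrio, hm]
        rw [this, ih (max acc 2) (by omega) (by omega)]
        simp only [hm]
        have e1 : (("high" : String) == "medium") = false := by decide
        simp [e1]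
      · have : pvPrio (pvLike r) = 1 := by simp [pvPrio, hh, hm]
        rw [this]
        have hmax : max acc 1 = acc := by omega
        rw [hmax, ih acc h1 h3]
        have e1 : (("high" : String) == pvLike r) = false := by
          rw [beq_eq_false_iff_ne]; exact fun h => hh h.symm
        have e2 : (("medium" : String) == pvLike r) = false := by
          rw [beq_eq_false_iff_ne]; exact fun h => hm h.symm
        simp [e1, e2]

-- ===== VERDICT (by name: the statement is the Claim_ definition above) =====
theorem derive_risk_level_spec : Claim_equal_derive_risk_level := by
  intro risks _
  unfold Spec_derive_risk_level derive_risk_level derive_risk_level_alt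
  show _ = (if (risks.foldl (fun acc r => max acc (pvPrio (pvLike r))) 1) = 3 then "high"
    else if (risks.foldl (fun acc r => max acc (pvPrio (pvLike r))) 1) = 2 then "medium" else "low")
  rw [pv_fold_char risks 1 (by omega) (by omega)]
  rcases risks with _ | ⟨r, rs⟩
  · simp
  · simp only [if_neg (List.cons_ne_nil r rs)]
    show (if ((r :: rs).map pvLike).contains "high" then "high"
      else if ((r :: rs).map pvLike).contains "medium" then "medium" else "low") = _
    split_ifs with h1 h2 <;> simp_all
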